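-- pv_equiv track=rewrite | github.com/Otto1221/EC552_Final_Project | Code/src/comprehensive_rubric.py | d3_grammar
-- ===== SOURCE A (Python) =====
-- def pts(num, den, maximum):
--     if den == 0:
--         return maximum
--     return int(round(maximum * num / den))
--
-- def d3_grammar(j):
--     blank = {'tx_signature':(0,10),'tl_signature':(0,10),'reg_signature':(0,10),
--              'no_self_loops':(0,5),'cds_wiring':(0,15),'terminator_coverage':(0,10)}
--     if j is None:
--         return blank
--     comps = [c for c in j.get('components',[]) if isinstance(c, dict)]
--     ixs   = [x for x in j.get('interactions',[]) if isinstance(x, dict)]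
--     if not comps or not ixs:
--         return blank
--     ct = {c.get('name'): c.get('type') for c in comps}
--     cds_names = {c.get('name') for c in comps if c.get('type') == 'cds'}
--     tx = [x for x in ixs if x.get('type')=='transcription']
--     tl = [x for x in ixs if x.get('type')=='translation']
--     reg = [x for x in ixs if x.get('type') in ('activation','repression')]
--     sc = {}
--     tx_ok = sum(1 for x in tx if ct.get(x.get('from')) in ('promoter','operator')
--                 and ct.get(x.get('to')) in ('cds','other'))
--     sc['tx_signature'] = (pts(tx_ok, len(tx), 10), 10) if tx else (10,10)
--     tl_ok = sum(1 for x in tl if ct.get(x.get('from')) in ('rbs','other')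
--                 and ct.get(x.get('to')) in ('cds','other'))
--     sc['tl_signature'] = (pts(tl_ok, len(tl), 10), 10) if tl else (10,10)
--     reg_ok = sum(1 for x in reg if ct.get(x.get('from')) in ('cds','other')
--                  and ct.get(x.get('to')) in ('promoter','operator','cds','other'))
--     sc['reg_signature'] = (pts(reg_ok, len(reg), 10), 10) if reg else (10,10)
--     sc['no_self_loops'] = ((5,5) if not any(x.get('from')==x.get('to') for x in ixs) else (0,5))
--     tx_targets = {x.get('to') for x in tx}
--     tl_targets = {x.get('to') for x in tl}
--     if cds_names:
--         wired = sum(1 for n in cds_names if n in tx_targets and n in tl_targets)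
--         sc['cds_wiring'] = (pts(wired, len(cds_names), 15), 15)
--     else:
--         sc['cds_wiring'] = (0, 15)
--     n_terms = sum(1 for c in comps if c.get('type')=='terminator')
--     n_cds = len(cds_names)
--     if n_cds == 0: sc['terminator_coverage'] = (10,10)
--     elif n_terms >= n_cds: sc['terminator_coverage'] = (10,10)
--     elif n_terms >= n_cds*0.5: sc['terminator_coverage'] = (6,10)
--     elif n_terms >= 1: sc['terminator_coverage'] = (3,10)
--     else: sc['terminator_coverage'] = (0,10)
--     return sc
-- ===== SOURCE B (Python) =====
-- def pts(num, den, maximum):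
--     if den == 0:
--         return maximum
--     return int(round(maximum * num / den))
--
-- def d3_grammar(j):
--     blank = {'tx_signature':(0,10),'tl_signature':(0,10),'reg_signature':(0,10),
--              'no_self_loops':(0,5),'cds_wiring':(0,15),'terminator_coverage':(0,10)}
--     if j is None:
--         return blank
--     comps = [c for c in j.get('components',[]) if isinstance(c, dict)]
--     ixs   = [x for x in j.get('interactions',[]) if isinstance(x, dict)]
--     if not comps or not ixs:
--         return blank
--     # single pass over components: type table, cds names, terminator count
--     ct = {}
--     cds_names = set()
--     n_terms = 0
--     for c in comps:
--         name, typ = c.get('name'), c.get('type')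
--         ct[name] = typ
--         if typ == 'cds':
--             cds_names.add(name)
--         if typ == 'terminator':
--             n_terms += 1
--     # single pass over interactions: totals, ok-counts, self-loop flag, target sets
--     tx_total = tx_ok = tl_total = tl_ok = reg_total = reg_ok = 0
--     no_self = True
--     tx_targets = set()
--     tl_targets = set()
--     for x in ixs:
--         t, f, to = x.get('type'), x.get('from'), x.get('to')
--         if f == to:
--             no_self = False
--         src, dst = ct.get(f), ct.get(to)
--         if t == 'transcription':
--             tx_total += 1
--             tx_targets.add(to)
--             if src in ('promoter','operator') and dst in ('cds','other'):
--                 tx_ok += 1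
--         elif t == 'translation':
--             tl_total += 1
--             tl_targets.add(to)
--             if src in ('rbs','other') and dst in ('cds','other'):
--                 tl_ok += 1
--         elif t in ('activation','repression'):
--             reg_total += 1
--             if src in ('cds','other') and dst in ('promoter','operator','cds','other'):
--                 reg_ok += 1
--     n_cds = len(cds_names)
--     wired = sum(1 for n in cds_names if n in tx_targets and n in tl_targets)
--     if n_cds == 0 or n_terms >= n_cds:
--         term = (10,10)
--     elif 2*n_terms >= n_cds:
--         term = (6,10)
--     elif n_terms >= 1:
--         term = (3,10)
--     else:
--         term = (0,10)
--     return {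
--         'tx_signature': (pts(tx_ok, tx_total, 10), 10) if tx_total else (10,10),
--         'tl_signature': (pts(tl_ok, tl_total, 10), 10) if tl_total else (10,10),
--         'reg_signature': (pts(reg_ok, reg_total, 10), 10) if reg_total else (10,10),
--         'no_self_loops': (5,5) if no_self else (0,5),
--         'cds_wiring': (pts(wired, n_cds, 15), 15) if n_cds else (0,15),
--         'terminator_coverage': term,
--     }
-- ===== Notes on version B (the rewrite author's own statement) =====
-- stated objective: alternative
-- what changed: A's eight separate type-filtering comprehensions and scans over the interactions (plus three scans over the components) are replaced by one accumulating pass over the components and one over the interactions that maintain all counters, the self-loop flag and the target sets at once.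
import Mathlib
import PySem

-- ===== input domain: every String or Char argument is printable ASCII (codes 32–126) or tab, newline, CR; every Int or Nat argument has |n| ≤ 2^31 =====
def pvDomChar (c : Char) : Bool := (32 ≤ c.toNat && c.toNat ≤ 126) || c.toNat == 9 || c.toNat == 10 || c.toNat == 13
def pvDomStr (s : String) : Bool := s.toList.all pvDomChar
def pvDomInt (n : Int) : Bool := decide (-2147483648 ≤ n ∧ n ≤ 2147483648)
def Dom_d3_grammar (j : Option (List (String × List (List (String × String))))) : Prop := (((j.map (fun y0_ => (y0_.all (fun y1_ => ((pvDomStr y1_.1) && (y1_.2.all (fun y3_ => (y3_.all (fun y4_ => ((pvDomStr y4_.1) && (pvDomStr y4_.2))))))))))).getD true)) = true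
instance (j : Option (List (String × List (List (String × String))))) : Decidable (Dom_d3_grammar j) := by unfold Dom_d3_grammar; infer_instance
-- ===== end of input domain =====

-- B replaces A's eight separate comprehensions/scans by one pass over the components and one
-- pass over the interactions that accumulate all counters, the self-loop flag and the target
-- sets at once (objective: alternative decomposition, single-pass).

-- ===== PORT A =====
-- shared helper (both Pythons define the identical `pts`):
-- int(round(maximum * num / den)) is ported as round-half-even of the exact rational
-- maximum*num/den; this agrees with CPython's float computation for the arguments that occur
-- here (0 ≤ num ≤ den, den a list length, maximum ∈ {10,15})
def pts (num den maximum : Int) : Int :=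
  if den = 0 then maximum
  else
    let q := PySem.Int.floordiv (maximum * num) den
    let r := maximum * num - q * den
    if 2 * r < den then q
    else if den < 2 * r then q + 1
    else if q % 2 = 0 then q else q + 1

-- shared helper: c.get(k) on an inner dict (first match; none = key absent)
def dGet (c : List (String × String)) (k : String) : Option String :=
  (PySem.Dict.mk c).get? k

-- the `blank` dict literal (identical in both Pythons)
def blankScore : List (String × Int × Int) :=
  [("tx_signature", (0, 10)), ("tl_signature", (0, 10)), ("reg_signature", (0, 10)),
   ("no_self_loops", (0, 5)), ("cds_wiring", (0, 15)), ("terminator_coverage", (0, 10))]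

-- the scoring part of A (everything after the two blank guards)
def d3_score (comps ixs : List (List (String × String))) : List (String × Int × Int) :=
      let ct : PySem.Dict (Option String) (Option String) :=
        comps.foldl (fun d c => d.insert (dGet c "name") (dGet c "type")) PySem.Dict.empty
      let cds_names : PySem.Set (Option String) :=
        PySem.Set.ofList ((comps.filter (fun c => dGet c "type" == some "cds")).map (fun c => dGet c "name"))
      let tx := ixs.filter (fun x => dGet x "type" == some "transcription")
      let tl := ixs.filter (fun x => dGet x "type" == some "translation")
      let reg := ixs.filter (fun x => dGet x "type" == some "activation" || dGet x "type" == some "repression")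
      let tx_ok : Int := (tx.countP (fun x =>
        (ct.getD (dGet x "from") none == some "promoter" || ct.getD (dGet x "from") none == some "operator")
        && (ct.getD (dGet x "to") none == some "cds" || ct.getD (dGet x "to") none == some "other")) : Int)
      let e1 : Int × Int := if tx ≠ [] then (pts tx_ok (tx.length : Int) 10, 10) else (10, 10)
      let tl_ok : Int := (tl.countP (fun x =>
        (ct.getD (dGet x "from") none == some "rbs" || ct.getD (dGet x "from") none == some "other")
        && (ct.getD (dGet x "to") none == some "cds" || ct.getD (dGet x "to") none == some "other")) : Int)
      let e2 : Int × Int := if tl ≠ [] then (pts tl_ok (tl.length : Int) 10, 10) else (10, 10)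
      let reg_ok : Int := (reg.countP (fun x =>
        (ct.getD (dGet x "from") none == some "cds" || ct.getD (dGet x "from") none == some "other")
        && (ct.getD (dGet x "to") none == some "promoter" || ct.getD (dGet x "to") none == some "operator"
            || ct.getD (dGet x "to") none == some "cds" || ct.getD (dGet x "to") none == some "other")) : Int)
      let e3 : Int × Int := if reg ≠ [] then (pts reg_ok (reg.length : Int) 10, 10) else (10, 10)
      let e4 : Int × Int := if !(ixs.any (fun x => dGet x "from" == dGet x "to")) then (5, 5) else (0, 5)
      let tx_targets : PySem.Set (Option String) := PySem.Set.ofList (tx.map (fun x => dGet x "to"))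
      let tl_targets : PySem.Set (Option String) := PySem.Set.ofList (tl.map (fun x => dGet x "to"))
      let e5 : Int × Int :=
        if cds_names ≠ [] then
          let wired : Int := (cds_names.countP (fun n => tx_targets.contains n && tl_targets.contains n) : Int)
          (pts wired (PySem.Set.len cds_names) 15, 15)
        else (0, 15)
      let n_terms : Int := (comps.countP (fun c => dGet c "type" == some "terminator") : Int)
      let n_cds : Int := PySem.Set.len cds_names
      -- n_terms >= n_cds*0.5 is exact in integers as 2*n_terms ≥ n_cds
      let e6 : Int × Int :=
        if n_cds = 0 then (10, 10)
        else if n_terms ≥ n_cds then (10, 10)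
        else if 2 * n_terms ≥ n_cds then (6, 10)
        else if n_terms ≥ 1 then (3, 10)
        else (0, 10)
      [("tx_signature", e1), ("tl_signature", e2), ("reg_signature", e3),
       ("no_self_loops", e4), ("cds_wiring", e5), ("terminator_coverage", e6)]

def d3_grammar (j : Option (List (String × List (List (String × String))))) : List (String × Int × Int) :=
  match j with
  | none => blankScore
  | some jd =>
    -- under the type convention every list element IS a dict, so the isinstance filters keep everything
    let comps := (PySem.Dict.mk jd).getD "components" []
    let ixs := (PySem.Dict.mk jd).getD "interactions" []
    if comps = [] ∨ ixs = [] then blankScore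
    else d3_score comps ixs

-- ===== PORT B =====
structure BComp where
  ct : PySem.Dict (Option String) (Option String)
  cds : PySem.Set (Option String)
  nTerms : Int

structure BIx where
  txTot : Int
  txOk : Int
  tlTot : Int
  tlOk : Int
  regTot : Int
  regOk : Int
  noSelf : Bool
  txT : PySem.Set (Option String)
  tlT : PySem.Set (Option String)

def bCompStep (s : BComp) (c : List (String × String)) : BComp :=
  let name := dGet c "name"
  let typ := dGet c "type"
  { ct := s.ct.insert name typ
  , cds := if typ == some "cds" then s.cds.add name else s.cds
  , nTerms := if typ == some "terminator" then s.nTerms + 1 else s.nTerms }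

def bIxStep (ct : PySem.Dict (Option String) (Option String)) (s : BIx) (x : List (String × String)) : BIx :=
  let t := dGet x "type"
  let f := dGet x "from"
  let tgt := dGet x "to"
  let s1 := { s with noSelf := if f == tgt then false else s.noSelf }
  let src := ct.getD f none
  let dst := ct.getD tgt none
  if t == some "transcription" then
    { s1 with txTot := s1.txTot + 1, txT := s1.txT.add tgt,
              txOk := if (src == some "promoter" || src == some "operator")
                         && (dst == some "cds" || dst == some "other") then s1.txOk + 1 else s1.txOk }
  else if t == some "translation" then
    { s1 with tlTot := s1.tlTot + 1, tlT := s1.tlT.add tgt,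
              tlOk := if (src == some "rbs" || src == some "other")
                         && (dst == some "cds" || dst == some "other") then s1.tlOk + 1 else s1.tlOk }
  else if t == some "activation" || t == some "repression" then
    { s1 with regTot := s1.regTot + 1,
              regOk := if (src == some "cds" || src == some "other")
                          && (dst == some "promoter" || dst == some "operator"
                              || dst == some "cds" || dst == some "other") then s1.regOk + 1 else s1.regOk }
  else s1

-- the scoring part of B: the two single passes and the assembly
def d3_score_alt (comps ixs : List (List (String × String))) : List (String × Int × Int) :=
      let cs := comps.foldl bCompStep ⟨PySem.Dict.empty, PySem.Set.empty, 0⟩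
      let st := ixs.foldl (bIxStep cs.ct) ⟨0, 0, 0, 0, 0, 0, true, PySem.Set.empty, PySem.Set.empty⟩
      let nCds : Int := PySem.Set.len cs.cds
      let wired : Int := (cs.cds.countP (fun n => st.txT.contains n && st.tlT.contains n) : Int)
      let term : Int × Int :=
        if nCds = 0 ∨ cs.nTerms ≥ nCds then (10, 10)
        else if 2 * cs.nTerms ≥ nCds then (6, 10)
        else if cs.nTerms ≥ 1 then (3, 10)
        else (0, 10)
      [("tx_signature", if st.txTot ≠ 0 then (pts st.txOk st.txTot 10, 10) else (10, 10)),
       ("tl_signature", if st.tlTot ≠ 0 then (pts st.tlOk st.tlTot 10, 10) else (10, 10)),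
       ("reg_signature", if st.regTot ≠ 0 then (pts st.regOk st.regTot 10, 10) else (10, 10)),
       ("no_self_loops", if st.noSelf then (5, 5) else (0, 5)),
       ("cds_wiring", if nCds ≠ 0 then (pts wired nCds 15, 15) else (0, 15)),
       ("terminator_coverage", term)]

def d3_grammar_alt (j : Option (List (String × List (List (String × String))))) : List (String × Int × Int) :=
  match j with
  | none => blankScore
  | some jd =>
    let comps := (PySem.Dict.mk jd).getD "components" []
    let ixs := (PySem.Dict.mk jd).getD "interactions" []
    if comps = [] ∨ ixs = [] then blankScore
    else d3_score_alt comps ixs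

-- ===== PRECONDITION & SPEC =====
def Spec_d3_grammar (j : Option (List (String × List (List (String × String))))) (out : List (String × Int × Int)) : Prop := out = d3_grammar_alt j
instance (j : Option (List (String × List (List (String × String))))) (out : List (String × Int × Int)) : Decidable (Spec_d3_grammar j out) := by unfold Spec_d3_grammar; infer_instance

-- ===== CLAIM (what is proved, stated in full; the proofs are below) =====
def Claim_equal_d3_grammar : Prop := ∀ (j : Option (List (String × List (List (String × String))))), Dom_d3_grammar j → Spec_d3_grammar j (d3_grammar j)

-- ===== LEMMAS AND PROOFS =====

theorem bComp_fold (comps : List (List (String × String))) (s : BComp) :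
    comps.foldl bCompStep s =
      ⟨comps.foldl (fun d c => d.insert (dGet c "name") (dGet c "type")) s.ct,
       PySem.Set.update s.cds ((comps.filter (fun c => dGet c "type" == some "cds")).map (fun c => dGet c "name")),
       s.nTerms + (comps.countP (fun c => dGet c "type" == some "terminator") : Int)⟩ := by
  induction comps generalizing s with
  | nil => simp [PySem.Set.update]
  | cons c cs ih =>
    simp only [List.foldl_cons, ih, List.filter_cons, List.countP_cons, bCompStep]
    by_cases h1 : (dGet c "type" == some "cds") = true <;>
      by_cases h2 : (dGet c "type" == some "terminator") = true <;>
        simp [h1, h2, PySem.Set.update] <;> omega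

theorem bIx_fold (ct : PySem.Dict (Option String) (Option String))
    (ixs : List (List (String × String))) (s : BIx) :
    ixs.foldl (bIxStep ct) s =
      ⟨s.txTot + (((ixs.filter (fun x => dGet x "type" == some "transcription")).length : Int)),
       s.txOk + ((ixs.filter (fun x => dGet x "type" == some "transcription")).countP (fun x =>
         (ct.getD (dGet x "from") none == some "promoter" || ct.getD (dGet x "from") none == some "operator")
         && (ct.getD (dGet x "to") none == some "cds" || ct.getD (dGet x "to") none == some "other")) : Int),
       s.tlTot + (((ixs.filter (fun x => dGet x "type" == some "translation")).length : Int)),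
       s.tlOk + ((ixs.filter (fun x => dGet x "type" == some "translation")).countP (fun x =>
         (ct.getD (dGet x "from") none == some "rbs" || ct.getD (dGet x "from") none == some "other")
         && (ct.getD (dGet x "to") none == some "cds" || ct.getD (dGet x "to") none == some "other")) : Int),
       s.regTot + (((ixs.filter (fun x => dGet x "type" == some "activation" || dGet x "type" == some "repression")).length : Int)),
       s.regOk + ((ixs.filter (fun x => dGet x "type" == some "activation" || dGet x "type" == some "repression")).countP (fun x =>
         (ct.getD (dGet x "from") none == some "cds" || ct.getD (dGet x "from") none == some "other")
         && (ct.getD (dGet x "to") none == some "promoter" || ct.getD (dGet x "to") none == some "operator"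
             || ct.getD (dGet x "to") none == some "cds" || ct.getD (dGet x "to") none == some "other")) : Int),
       s.noSelf && !(ixs.any (fun x => dGet x "from" == dGet x "to")),
       PySem.Set.update s.txT ((ixs.filter (fun x => dGet x "type" == some "transcription")).map (fun x => dGet x "to")),
       PySem.Set.update s.tlT ((ixs.filter (fun x => dGet x "type" == some "translation")).map (fun x => dGet x "to"))⟩ := by
  induction ixs generalizing s with
  | nil => simp [PySem.Set.update]
  | cons x xs ih =>
    simp only [List.foldl_cons, ih, List.filter_cons, List.any_cons, bIxStep]
    by_cases h1 : (dGet x "type" == some "transcription") = true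
    · have h2 : (dGet x "type" == some "translation") = false := by
        simp_all [beq_iff_eq]
      have h3 : (dGet x "type" == some "activation" || dGet x "type" == some "repression") = false := by
        simp_all [beq_iff_eq]
      by_cases hs : (dGet x "from" == dGet x "to") = true <;>
        by_cases hok : ((ct.getD (dGet x "from") none == some "promoter" || ct.getD (dGet x "from") none == some "operator")
          && (ct.getD (dGet x "to") none == some "cds" || ct.getD (dGet x "to") none == some "other")) = true <;>
          simp [h1, h2, h3, hs, hok, PySem.Set.update] <;> omega
    · by_cases h2 : (dGet x "type" == some "translation") = true
      · have h3 : (dGet x "type" == some "activation" || dGet x "type" == some "repression") = false := by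
          simp_all [beq_iff_eq]
        by_cases hs : (dGet x "from" == dGet x "to") = true <;>
          by_cases hok : ((ct.getD (dGet x "from") none == some "rbs" || ct.getD (dGet x "from") none == some "other")
            && (ct.getD (dGet x "to") none == some "cds" || ct.getD (dGet x "to") none == some "other")) = true <;>
            simp [h1, h2, h3, hs, hok, PySem.Set.update] <;> omega
      · by_cases h3 : (dGet x "type" == some "activation" || dGet x "type" == some "repression") = true
        · by_cases hs : (dGet x "from" == dGet x "to") = true <;>
            by_cases hok : ((ct.getD (dGet x "from") none == some "cds" || ct.getD (dGet x "from") none == some "other")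
              && (ct.getD (dGet x "to") none == some "promoter" || ct.getD (dGet x "to") none == some "operator"
                  || ct.getD (dGet x "to") none == some "cds" || ct.getD (dGet x "to") none == some "other")) = true <;>
              simp [h1, h2, h3, hs, hok, PySem.Set.update] <;> omega
        · by_cases hs : (dGet x "from" == dGet x "to") = true <;>
            simp [h1, h2, h3, hs, PySem.Set.update]

set_option maxHeartbeats 2000000 in
theorem score_eq (comps ixs : List (List (String × String))) :
    d3_score comps ixs = d3_score_alt comps ixs := by
    simp only [d3_score, d3_score_alt]
    rw [bComp_fold, bIx_fold]
    have hup : ∀ (l : List (Option String)), PySem.Set.update PySem.Set.empty l = PySem.Set.ofList l := by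
      intro l; rfl
    simp only [hup, zero_add, Bool.true_and]
    have hlen : ∀ (l : List (List (String × String))), ((l.length : Int) ≠ 0) ↔ l ≠ [] := by
      intro l
      constructor
      · intro hne he; apply hne; simp [he]
      · intro hne hz
        exact hne (List.length_eq_zero_iff.mp (by exact_mod_cast hz))
    simp only [List.cons.injEq, Prod.mk.injEq, and_true, true_and]
    repeat' apply And.intro
    all_goals
      first
        | rfl
        | (split_ifs <;> simp_all [hlen, PySem.Set.len] <;> omega)

theorem main_eq (j : Option (List (String × List (List (String × String))))) :
    d3_grammar j = d3_grammar_alt j := by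
  cases j with
  | none => rfl
  | some jd =>
    simp only [d3_grammar, d3_grammar_alt]
    split_ifs with h
    · rfl
    · exact score_eq _ _

-- ===== VERDICT (by name: the statement is the Claim_ definition above) =====
theorem d3_grammar_spec : Claim_equal_d3_grammar := by
  intro j _
  unfold Spec_d3_grammar
  exact main_eq j
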